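-- pv_equiv track=rewrite | github.com/Pshimaf/Regular_Expression_Solver | regexps/main.py | __kleene_star
-- ===== SOURCE A (Python) =====
-- from math import gcd
--
-- def __kleene_star(first_list, division_number) -> list:
--     result_list = [0 for j in range(division_number)]
--     general_gsd = division_number
--     for j in range(division_number):
--         if first_list[j] == 1:
--             general_gsd = gcd(general_gsd, j)
--     for j in range(division_number):
--         if j % general_gsd == 0:
--             result_list[j] = 1
--     return result_list
-- ===== SOURCE B (Python) =====
-- def __kleene_star(first_list, division_number) -> list:
--     n = division_number
--     if n <= 0:
--         return []
--     gens = [j for j, v in enumerate(first_list[:n]) if v == 1]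
--     reach = {0}
--     for _ in range(n):
--         reach |= {(r + g) % n for r in reach for g in gens}
--     return [1 if i in reach else 0 for i in range(n)]
-- ===== Notes on version B (the rewrite author's own statement) =====
-- stated objective: alternative
-- what changed: B replaces A's gcd computation entirely by a fixpoint iteration: it collects the generator residues, grows the reachable set from {0} by repeatedly adding (r+g) % n for n passes (a worklist-free closure), and emits 1 exactly at reachable indices; no gcd is ever computed.
import Mathlib
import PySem

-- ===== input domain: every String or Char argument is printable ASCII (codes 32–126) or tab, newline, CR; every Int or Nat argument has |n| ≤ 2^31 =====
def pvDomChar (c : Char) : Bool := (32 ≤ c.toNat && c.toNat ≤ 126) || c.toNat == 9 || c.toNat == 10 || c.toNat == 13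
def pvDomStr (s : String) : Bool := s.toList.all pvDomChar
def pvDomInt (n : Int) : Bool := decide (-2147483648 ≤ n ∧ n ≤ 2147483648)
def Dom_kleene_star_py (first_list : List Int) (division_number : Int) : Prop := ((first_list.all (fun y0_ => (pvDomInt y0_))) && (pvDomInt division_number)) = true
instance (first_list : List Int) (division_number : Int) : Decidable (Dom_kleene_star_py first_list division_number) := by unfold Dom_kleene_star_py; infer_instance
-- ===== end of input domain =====

-- B computes the result by a gcd-free fixpoint iteration (grow the set reachable from 0 by
-- adding generator residues mod n until saturation) instead of A's gcd-and-mark two passes.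

-- ===== PORT A =====
-- math.gcd(a, b) on ints is the nonnegative gcd of |a|, |b|: exactly (Int.gcd a b : Int).
def kleene_star_py (first_list : List Int) (division_number : Int) : List Int :=
  let result_list : List Int := (PySem.List.pyRange 0 division_number 1).map (fun _ => 0)
  let general_gsd : Int :=
    (PySem.List.pyRange 0 division_number 1).foldl
      (fun g j => if PySem.List.pyGetD first_list j 0 == 1 then (Int.gcd g j : Int) else g)
      division_number
  (PySem.List.pyRange 0 division_number 1).foldl
    (fun res j => if PySem.Int.mod j general_gsd == 0 then PySem.List.pySetD res j 1 else res)
    result_list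

-- ===== PORT B =====
-- 'reach |= {…}' builds the comprehension set from the old reach and unions it in; the set is
-- only ever consumed by membership tests, so PySem.Set is exact here.
def kleene_star_py_alt (first_list : List Int) (division_number : Int) : List Int :=
  if division_number ≤ 0 then []
  else
    let gens : List Int :=
      ((PySem.List.enumerate (PySem.List.slice first_list none (some division_number))).filter
        (fun jv => jv.2 == 1)).map (fun jv => jv.1)
    let reach : PySem.Set Int :=
      (PySem.List.pyRange 0 division_number 1).foldl
        (fun reach _ =>
          PySem.Set.union reach
            (PySem.Set.ofList (reach.flatMap
              (fun r => gens.map (fun g => PySem.Int.mod (r + g) division_number)))))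
        (PySem.Set.ofList [0])
    (PySem.List.pyRange 0 division_number 1).map
      (fun i => if PySem.Set.contains reach i then (1 : Int) else 0)

-- ===== PRECONDITION & SPEC =====
-- A indexes first_list[j] for every j in range(division_number): it raises IndexError when
-- 0 < division_number and the list is shorter than division_number; exactly those inputs are excluded.
def Pre_kleene_star_py (first_list : List Int) (division_number : Int) : Prop :=
  division_number ≤ 0 ∨ division_number ≤ (first_list.length : Int)
instance (first_list : List Int) (division_number : Int) : Decidable (Pre_kleene_star_py first_list division_number) := by unfold Pre_kleene_star_py; infer_instance

def pvWitness_kleene_star_py : List Int × Int := ([1, 0, 1, 0, 0, 1], 6)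

def Spec_kleene_star_py (first_list : List Int) (division_number : Int) (out : List Int) : Prop := out = kleene_star_py_alt first_list division_number
instance (first_list : List Int) (division_number : Int) (out : List Int) : Decidable (Spec_kleene_star_py first_list division_number out) := by unfold Spec_kleene_star_py; infer_instance

-- ===== CLAIM (what is proved, stated in full; the proofs are below) =====
def Claim_equal_kleene_star_py : Prop := ∀ (first_list : List Int) (division_number : Int), Dom_kleene_star_py first_list division_number → Pre_kleene_star_py first_list division_number → Spec_kleene_star_py first_list division_number (kleene_star_py first_list division_number)

-- ===== LEMMAS AND PROOFS =====

-- ---- the gcd value both characterizations go through ----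

def gfold : List Int → Int → Int → Int
  | [], _, g => g
  | v :: t, j, g => gfold t (j + 1) (if v == 1 then (Int.gcd g j : Int) else g)

def gensIdx (ys : List Int) (s : Int) : List Int :=
  ((PySem.List.enumerate ys s).filter (fun jv => jv.2 == 1)).map (fun jv => jv.1)

def gcdFold (l : List Int) (a : Int) : Int := l.foldl (fun a j => (Int.gcd a j : Int)) a

theorem gfold_eq_gcdFold : ∀ (ys : List Int) (s a : Int),
    gfold ys s a = gcdFold (gensIdx ys s) a := by
  intro ys
  induction ys with
  | nil => intro s a; simp [gfold, gensIdx, gcdFold, PySem.List.enumerate_nil]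
  | cons v t ih =>
    intro s a
    simp only [gfold, gensIdx, PySem.List.enumerate_cons, List.filter_cons]
    by_cases h : (v == 1) = true
    · simp only [h, if_true, List.map_cons, gcdFold, List.foldl_cons]
      simpa [gensIdx, gcdFold] using ih (s+1) (Int.gcd a s)
    · simp only [h, Bool.false_eq_true, if_false]
      simpa [gensIdx, gcdFold] using ih (s+1) a

theorem gcdFold_pos_dvd : ∀ (l : List Int) (a : Int), 0 < a →
    0 < gcdFold l a ∧ gcdFold l a ∣ a ∧ ∀ j ∈ l, gcdFold l a ∣ j := by
  intro l
  induction l with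
  | nil => intro a ha; exact ⟨ha, dvd_refl a, by simp⟩
  | cons j t ih =>
    intro a ha
    have hpos : 0 < (Int.gcd a j : Int) := by
      exact_mod_cast Int.gcd_pos_of_ne_zero_left j (ne_of_gt ha)
    have hstep : gcdFold (j :: t) a = gcdFold t (Int.gcd a j : Int) := by
      simp [gcdFold]
    obtain ⟨h1, h2, h3⟩ := ih (Int.gcd a j : Int) hpos
    rw [hstep]
    refine ⟨h1, h2.trans (Int.gcd_dvd_left a j), ?_⟩
    intro x hx
    rcases List.mem_cons.mp hx with rfl | hx'
    · exact h2.trans (Int.gcd_dvd_right a x)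
    · exact h3 x hx'

theorem foldA_eq_gfold (full : List Int) : ∀ (ys : List Int) (s g : Int), 0 ≤ s →
    s.toNat + ys.length ≤ full.length →
    (∀ k : Nat, (h : k < ys.length) → full[s.toNat + k]? = some ys[k]) →
    (PySem.List.pyRange s (s + ys.length) 1).foldl
      (fun g j => if PySem.List.pyGetD full j 0 == 1 then (Int.gcd g j : Int) else g) g
    = gfold ys s g := by
  intro ys
  induction ys with
  | nil =>
    intro s g hs _ _
    rw [show s + ([] : List Int).length = s by simp, PySem.List.pyRange_one_eq_nil (le_refl s)]
    rfl
  | cons v t ih =>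
    intro s g hs hlen hget
    have hcons : PySem.List.pyRange s (s + (v :: t).length) 1
        = s :: PySem.List.pyRange (s+1) (s + (v :: t).length) 1 := by
      apply PySem.List.pyRange_one_cons; simp
    rw [hcons]
    simp only [List.foldl_cons]
    have hv : PySem.List.pyGetD full s 0 = v := by
      rw [PySem.List.pyGetD_eq_getElem full 0 hs (by simp at hlen ⊢; omega)]
      have h0 := hget 0 (by simp)
      simp at h0
      rw [List.getElem?_eq_getElem (by simp at hlen ⊢; omega)] at h0
      injection h0
    rw [hv]
    have := ih (s+1) (if v == 1 then (Int.gcd g s : Int) else g) (by omega)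
      (by simp at hlen ⊢; omega)
      (by intro k hk
          have := hget (k+1) (by simp; omega)
          simpa [show (s+1).toNat + k = s.toNat + (k+1) by omega] using this)
    rw [show s + ((v :: t).length : Int) = (s+1) + (t.length : Int) by simp; omega]
    rw [this]
    rfl

theorem setfold (g : Int) : ∀ (N : Nat) (init : List Int), N ≤ init.length →
    ((List.range N).map (fun (k : Nat) => (k : Int))).foldl
      (fun res j => if PySem.Int.mod j g == 0 then PySem.List.pySetD res j 1 else res) init
    = (List.range N).map (fun (k : Nat) => if PySem.Int.mod (k : Int) g == 0 then (1 : Int) else init.getD k 0)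
      ++ init.drop N := by
  intro N
  induction N with
  | zero => intro init _; simp
  | succ N ih =>
    intro init hlen
    rw [List.range_succ, List.map_append, List.foldl_append]
    rw [ih init (by omega)]
    simp only [List.map_singleton, List.foldl_cons, List.foldl_nil]
    by_cases hc : (PySem.Int.mod (N : Int) g == 0) = true
    · simp only [hc, if_true]
      rw [PySem.List.pySetD_natCast]
      have hplen : ((List.range N).map (fun (k : Nat) => if PySem.Int.mod (k : Int) g == 0 then (1 : Int) else init.getD k 0)).length = N := by simp
      rw [List.set_append_right _ _ (by omega)]
      rw [hplen]
      have hdrop : init.drop N = init[N] :: init.drop (N+1) := List.drop_eq_getElem_cons (by omega)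
      rw [hdrop]
      simp only [Nat.sub_self, List.set_cons_zero]
      simp [List.map_append]
      exact fun h => absurd (by simpa using hc) h
    · have hdrop : init.drop N = init[N] :: init.drop (N+1) := List.drop_eq_getElem_cons (by omega)
      rw [if_neg hc, List.map_append]
      have hne : PySem.Int.mod (↑N) g ≠ 0 := by simpa using hc
      simp [hne]
      rw [hdrop]
      simp [List.getElem?_eq_getElem (show N < init.length by omega)]

-- ---- B side: one pass of the fixpoint iteration, and its iterates ----

def passFn (gens : List Int) (n : Int) (S : PySem.Set Int) : PySem.Set Int :=
  PySem.Set.union S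
    (PySem.Set.ofList (S.flatMap (fun r => gens.map (fun g => PySem.Int.mod (r + g) n))))

def iterR (gens : List Int) (n : Int) (k : Nat) : PySem.Set Int :=
  (passFn gens n)^[k] (PySem.Set.ofList [0])

theorem iterR_succ (gens : List Int) (n : Int) (k : Nat) :
    iterR gens n (k+1) = passFn gens n (iterR gens n k) :=
  Function.iterate_succ_apply' _ _ _

theorem mem_passFn (gens : List Int) (n : Int) (S : PySem.Set Int) (x : Int) :
    x ∈ passFn gens n S ↔ x ∈ S ∨ ∃ r ∈ S, ∃ g ∈ gens, x = PySem.Int.mod (r + g) n := by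
  simp only [passFn, PySem.Set.mem_union, PySem.Set.mem_ofList, List.mem_flatMap, List.mem_map]
  constructor
  · rintro (h | ⟨r, hr, g, hg, rfl⟩)
    · exact Or.inl h
    · exact Or.inr ⟨r, hr, g, hg, rfl⟩
  · rintro (h | ⟨r, hr, g, hg, rfl⟩)
    · exact Or.inl h
    · exact Or.inr ⟨r, hr, g, hg, rfl⟩

theorem foldl_pass_eq_iterR (gens : List Int) (n : Int) :
    ∀ (l : List Int) (S : PySem.Set Int),
      l.foldl (fun reach _ =>
          PySem.Set.union reach
            (PySem.Set.ofList (reach.flatMap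
              (fun r => gens.map (fun g => PySem.Int.mod (r + g) n))))) S
        = (passFn gens n)^[l.length] S := by
  intro l
  induction l with
  | nil => intro S; rfl
  | cons a t ih =>
    intro S
    simp only [List.foldl_cons, List.length_cons, Function.iterate_succ_apply]
    exact ih (passFn gens n S)

theorem zero_mem_iterR (gens : List Int) (n : Int) : ∀ k, (0:Int) ∈ iterR gens n k := by
  intro k
  induction k with
  | zero => simp [iterR, PySem.Set.mem_ofList]
  | succ k ih =>
    rw [iterR_succ]
    exact (mem_passFn gens n _ 0).mpr (Or.inl ih)

theorem mem_iterR_bounds (gens : List Int) (n : Int) (hn : 0 < n) :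
    ∀ (k : Nat) (x : Int), x ∈ iterR gens n k → 0 ≤ x ∧ x < n := by
  intro k
  induction k with
  | zero =>
    intro x hx
    have : x = 0 := by simpa [iterR, PySem.Set.mem_ofList] using hx
    omega
  | succ k ih =>
    intro x hx
    rw [iterR_succ] at hx
    rcases (mem_passFn _ _ _ _).mp hx with h | ⟨r, _, g, _, rfl⟩
    · exact ih x h
    · exact ⟨PySem.Int.mod_nonneg _ hn, PySem.Int.mod_lt _ hn⟩

theorem mem_iterR_mono (gens : List Int) (n : Int) (k : Nat) (x : Int)
    (hx : x ∈ iterR gens n k) : x ∈ iterR gens n (k+1) := by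
  rw [iterR_succ]
  exact (mem_passFn _ _ _ _).mpr (Or.inl hx)

theorem sat_succ (gens : List Int) (n : Int) (k : Nat)
    (h : ∀ x, x ∈ iterR gens n k ↔ x ∈ iterR gens n (k+1)) :
    ∀ x, x ∈ iterR gens n (k+1) ↔ x ∈ iterR gens n (k+2) := by
  intro x
  constructor
  · exact mem_iterR_mono _ _ _ _
  · intro hx
    rw [show k+2 = (k+1)+1 from rfl, iterR_succ] at hx
    rcases (mem_passFn _ _ _ _).mp hx with h1 | ⟨r, hr, g, hg, rfl⟩
    · exact h1
    · rw [iterR_succ]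
      exact (mem_passFn _ _ _ _).mpr (Or.inr ⟨r, (h r).mpr hr, g, hg, rfl⟩)

theorem sat_all (gens : List Int) (n : Int) (k : Nat)
    (h : ∀ x, x ∈ iterR gens n k ↔ x ∈ iterR gens n (k+1)) :
    ∀ d x, x ∈ iterR gens n (k+d) ↔ x ∈ iterR gens n (k+d+1) := by
  intro d
  induction d with
  | zero => exact h
  | succ d ih => exact sat_succ gens n (k+d) ih

theorem sat_N (gens : List Int) (n : Int) (hn : 0 < n) :
    ∀ x, x ∈ iterR gens n n.toNat ↔ x ∈ iterR gens n (n.toNat + 1) := by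
  by_cases hex : ∃ k, k < n.toNat ∧ ∀ x, x ∈ iterR gens n k ↔ x ∈ iterR gens n (k+1)
  · obtain ⟨k, hk, hsat⟩ := hex
    intro x
    obtain ⟨d, hd⟩ : ∃ d, n.toNat = k + d := ⟨n.toNat - k, by omega⟩
    rw [hd]
    exact sat_all gens n k hsat d x
  · exfalso
    push Not at hex
    have haux : ∀ k, k ≤ n.toNat →
        k + 1 ≤ ((Finset.range n.toNat).filter (fun i : Nat => (i:Int) ∈ iterR gens n k)).card := by
      intro k
      induction k with
      | zero =>
        intro _
        have h0 : (0:Nat) ∈ (Finset.range n.toNat).filter (fun i : Nat => (i:Int) ∈ iterR gens n 0) := by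
          simp only [Finset.mem_filter, Finset.mem_range]
          exact ⟨by omega, by simpa using zero_mem_iterR gens n 0⟩
        exact Finset.card_pos.mpr ⟨0, h0⟩
      | succ k ih =>
        intro hk1
        obtain ⟨x, hx⟩ := hex k (by omega)
        have hx2 : x ∈ iterR gens n (k+1) ∧ x ∉ iterR gens n k := by
          rcases hx with ⟨h1, h2⟩ | ⟨h1, h2⟩
          · exact absurd (mem_iterR_mono gens n k x h1) h2
          · exact ⟨h2, h1⟩
        have hb := mem_iterR_bounds gens n hn (k+1) x hx2.1
        have hxcast : ((x.toNat : Nat) : Int) = x := Int.toNat_of_nonneg hb.1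
        have hsub : (Finset.range n.toNat).filter (fun i : Nat => (i:Int) ∈ iterR gens n k)
            ⊆ (Finset.range n.toNat).filter (fun i : Nat => (i:Int) ∈ iterR gens n (k+1)) := by
          intro i hi
          simp only [Finset.mem_filter] at hi ⊢
          exact ⟨hi.1, mem_iterR_mono gens n k _ hi.2⟩
        have hmem : x.toNat ∈ (Finset.range n.toNat).filter (fun i : Nat => (i:Int) ∈ iterR gens n (k+1)) := by
          simp only [Finset.mem_filter, Finset.mem_range]
          constructor
          · omega
          · rw [hxcast]; exact hx2.1
        have hnotmem : x.toNat ∉ (Finset.range n.toNat).filter (fun i : Nat => (i:Int) ∈ iterR gens n k) := by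
          simp only [Finset.mem_filter, Finset.mem_range]
          intro hcon
          rw [hxcast] at hcon
          exact hx2.2 hcon.2
        have hss := (Finset.ssubset_iff_of_subset hsub).mpr ⟨x.toNat, hmem, hnotmem⟩
        have := Finset.card_lt_card hss
        have := ih (by omega)
        omega
    have h1 := haux n.toNat le_rfl
    have h2 : ((Finset.range n.toNat).filter (fun i : Nat => (i:Int) ∈ iterR gens n n.toNat)).card ≤ n.toNat := by
      calc ((Finset.range n.toNat).filter (fun i : Nat => (i:Int) ∈ iterR gens n n.toNat)).card
          ≤ (Finset.range n.toNat).card := Finset.card_filter_le _ _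
        _ = n.toNat := Finset.card_range _
    omega

-- ---- closure under adding the gcd (Bézout) ----

def cuProp (R : List Int) (n d : Int) : Prop := ∀ r ∈ R, (r + d) % n ∈ R

theorem cu_congr (R : List Int) (n d₁ d₂ : Int) (h : d₁ % n = d₂ % n)
    (h1 : cuProp R n d₁) : cuProp R n d₂ := by
  intro r hr
  have := h1 r hr
  rwa [show (r + d₁) % n = (r + d₂) % n from by rw [Int.add_emod, h, ← Int.add_emod]] at this

theorem cu_add (R : List Int) (n a b : Int) (ha : cuProp R n a) (hb : cuProp R n b) :
    cuProp R n (a + b) := by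
  intro r hr
  have h2 := hb _ (ha r hr)
  rwa [Int.emod_add_emod, add_assoc] at h2

theorem cu_zero (R : List Int) (n : Int) (hbound : ∀ x ∈ R, 0 ≤ x ∧ x < n) :
    cuProp R n 0 := by
  intro r hr
  rw [add_zero, Int.emod_eq_of_lt (hbound r hr).1 (hbound r hr).2]
  exact hr

theorem cu_nsmul (R : List Int) (n a : Int) (hbound : ∀ x ∈ R, 0 ≤ x ∧ x < n)
    (ha : cuProp R n a) : ∀ m : Nat, cuProp R n ((m:Int) * a) := by
  intro m
  induction m with
  | zero => simpa using cu_zero R n hbound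
  | succ m ih =>
    have : (((m+1 : Nat)):Int) * a = (m:Int) * a + a := by push_cast; ring
    rw [this]
    exact cu_add R n _ _ ih ha

theorem cu_gcd (R : List Int) (n a b : Int) (hn : n ≠ 0)
    (hbound : ∀ x ∈ R, 0 ≤ x ∧ x < n)
    (ha : cuProp R n a) (hb : cuProp R n b) : cuProp R n (Int.gcd a b : Int) := by
  have hbez := Int.gcd_eq_gcd_ab a b
  have hxa : ((Int.gcdA a b % n).toNat : Int) = Int.gcdA a b % n :=
    Int.toNat_of_nonneg (Int.emod_nonneg _ hn)
  have hyb : ((Int.gcdB a b % n).toNat : Int) = Int.gcdB a b % n :=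
    Int.toNat_of_nonneg (Int.emod_nonneg _ hn)
  have hsum : cuProp R n (((Int.gcdA a b % n).toNat : Int) * a + ((Int.gcdB a b % n).toNat : Int) * b) :=
    cu_add R n _ _ (cu_nsmul R n a hbound ha _) (cu_nsmul R n b hbound hb _)
  apply cu_congr R n _ _ ?_ hsum
  rw [hxa, hyb, hbez]
  have h1 : Int.ModEq n (Int.gcdA a b % n) (Int.gcdA a b) := Int.emod_emod_of_dvd _ dvd_rfl
  have h2 : Int.ModEq n (Int.gcdB a b % n) (Int.gcdB a b) := Int.emod_emod_of_dvd _ dvd_rfl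
  have h3 := (h1.mul_right a).add (h2.mul_right b)
  calc (Int.gcdA a b % n * a + Int.gcdB a b % n * b) % n
      = (Int.gcdA a b * a + Int.gcdB a b * b) % n := h3
    _ = (a * Int.gcdA a b + b * Int.gcdB a b) % n := by ring_nf

theorem cu_gcdFold (R : List Int) (n : Int) (hn : n ≠ 0)
    (hbound : ∀ x ∈ R, 0 ≤ x ∧ x < n) :
    ∀ (l : List Int) (a : Int), cuProp R n a → (∀ j ∈ l, cuProp R n j) →
      cuProp R n (gcdFold l a) := by
  intro l
  induction l with
  | nil => intro a ha _; exact ha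
  | cons j t ih =>
    intro a ha hl
    have hstep : gcdFold (j :: t) a = gcdFold t (Int.gcd a j : Int) := by simp [gcdFold]
    rw [hstep]
    exact ih _ (cu_gcd R n a j hn hbound ha (hl j (List.mem_cons_self)))
      (fun x hx => hl x (List.mem_cons_of_mem _ hx))

theorem cu_multiples (R : List Int) (n g : Int) (h0 : (0:Int) ∈ R)
    (hg : cuProp R n g) : ∀ m : Nat, ((m:Int) * g) % n ∈ R := by
  intro m
  induction m with
  | zero => simpa using h0
  | succ m ih =>
    have h2 := hg _ ih
    rwa [Int.emod_add_emod, show (m:Int) * g + g = (((m+1 : Nat)):Int) * g from by push_cast; ring] at h2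

-- ---- the main equality ----

theorem main_eq (fl : List Int) (n : Int)
    (hpre : n ≤ 0 ∨ n ≤ (fl.length : Int)) :
    kleene_star_py fl n = kleene_star_py_alt fl n := by
  by_cases hn0 : n ≤ 0
  · simp [kleene_star_py, kleene_star_py_alt, PySem.List.pyRange_one_eq_nil hn0, hn0]
  · rw [not_le] at hn0
    have hlen : n ≤ (fl.length : Int) := hpre.resolve_left (not_le.mpr hn0)
    set N : Nat := n.toNat with hN
    have hNn : (N : Int) = n := Int.toNat_of_nonneg hn0.le
    set G : List Int := gensIdx (fl.take N) 0 with hGdef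
    set gInt : Int := gcdFold G n with hgdef
    -- A's gcd fold equals gInt
    have htl : ((fl.take N).length : Int) = n := by
      rw [List.length_take]
      have : min N fl.length = N := by omega
      rw [this]; exact hNn
    have hgA : (PySem.List.pyRange 0 n 1).foldl
        (fun g j => if PySem.List.pyGetD fl j 0 == 1 then (Int.gcd g j : Int) else g) n = gInt := by
      have h1 := foldA_eq_gfold fl (fl.take N) 0 n (le_refl 0)
        (by simp)
        (by intro k hk
            simp only [Int.toNat_zero, Nat.zero_add]
            rw [List.getElem?_eq_getElem (by simp at hk ⊢; omega)]
            congr 1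
            exact (List.getElem_take).symm)
      rw [show (0 : Int) + ((fl.take N).length : Int) = n from by rw [htl]; ring] at h1
      rw [h1, gfold_eq_gcdFold, ← hGdef]
    obtain ⟨hgpos, hgdvdn, hgdvdG⟩ := gcdFold_pos_dvd G n hn0
    -- A's result, pointwise
    have hA : kleene_star_py fl n
        = (List.range N).map (fun (k : Nat) => if PySem.Int.mod (k : Int) gInt == 0 then (1:Int) else 0) := by
      rw [kleene_star_py]
      simp only [hgA]
      have hinit : (PySem.List.pyRange 0 n 1).map (fun _ => (0:Int)) = List.replicate N 0 := by
        rw [List.map_const']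
        congr 1
        rw [PySem.List.length_pyRange_one]; omega
      rw [hinit, PySem.List.pyRange_zero n]
      rw [setfold gInt N (List.replicate N 0) (by simp)]
      simp
    -- B's result, pointwise
    have hgens2 : ((PySem.List.enumerate (PySem.List.slice fl none (some n))).filter
        (fun jv => jv.2 == 1)).map (fun jv => jv.1) = G := by
      rw [PySem.List.slice_to fl hn0.le]; rfl
    have hB : kleene_star_py_alt fl n
        = (List.range N).map (fun (k : Nat) => if PySem.Set.contains (iterR G n N) (k : Int) then (1:Int) else 0) := by
      simp only [kleene_star_py_alt, if_neg (show ¬ n ≤ 0 from not_le.mpr hn0)]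
      rw [hgens2, foldl_pass_eq_iterR G n]
      rw [show (PySem.List.pyRange 0 n 1).length = N from by rw [PySem.List.length_pyRange_one]; omega]
      rw [PySem.List.pyRange_zero n, List.map_map]
      rfl
    set R : PySem.Set Int := iterR G n N with hRdef
    have hsat := sat_N G n hn0
    have hbound : ∀ x ∈ R, 0 ≤ x ∧ x < n := fun x hx => mem_iterR_bounds G n hn0 N x hx
    have h0 : (0:Int) ∈ R := zero_mem_iterR G n N
    -- soundness: everything reachable is a multiple of gInt
    have hsound : ∀ (k : Nat) (x : Int), x ∈ iterR G n k → gInt ∣ x := by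
      intro k
      induction k with
      | zero =>
        intro x hx
        have : x = 0 := by simpa [iterR, PySem.Set.mem_ofList] using hx
        simp [this]
      | succ k ih =>
        intro x hx
        rw [iterR_succ] at hx
        rcases (mem_passFn _ _ _ _).mp hx with h | ⟨r, hr, g, hg, rfl⟩
        · exact ih x h
        · rw [PySem.Int.mod_eq_emod_of_pos hn0, Int.emod_def]
          exact dvd_sub (dvd_add (ih r hr) (hgdvdG g hg)) (hgdvdn.mul_right _)
    -- completeness: R is closed under adding gInt mod n, so every multiple is in R
    have hcl : ∀ r ∈ R, ∀ g ∈ G, (r + g) % n ∈ R := by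
      intro r hr g hg
      have h1 : PySem.Int.mod (r + g) n ∈ iterR G n (N+1) := by
        rw [iterR_succ]
        exact (mem_passFn G n (iterR G n N) _).mpr (Or.inr ⟨r, hr, g, hg, rfl⟩)
      have h2 := (hsat _).mpr h1
      rwa [PySem.Int.mod_eq_emod_of_pos hn0] at h2
    have hcu : cuProp R n gInt := by
      apply cu_gcdFold R n (by omega) hbound G n
      · intro r hr
        rw [Int.add_emod_right, Int.emod_eq_of_lt (hbound r hr).1 (hbound r hr).2]
        exact hr
      · intro j hj r hr
        exact hcl r hr j hj
    have hcomp : ∀ x : Int, 0 ≤ x → x < n → gInt ∣ x → x ∈ R := by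
      intro x hx0 hxn hdvd
      obtain ⟨c, hc⟩ := hdvd
      have hc0 : 0 ≤ c := by nlinarith
      have hx : ((c.toNat : Int)) * gInt = x := by
        rw [Int.toNat_of_nonneg hc0, hc]; ring
      have hm := cu_multiples R n gInt h0 hcu c.toNat
      rwa [hx, Int.emod_eq_of_lt hx0 hxn] at hm
    -- put the two characterizations together
    rw [hA, hB]
    apply List.map_congr_left
    intro k hk
    have hkN : k < N := List.mem_range.mp hk
    have hkn : (k : Int) < n := by rw [← hNn]; exact_mod_cast hkN
    have hiff : ((k : Int) ∈ R) ↔ gInt ∣ (k : Int) :=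
      ⟨hsound N _, hcomp _ (Int.natCast_nonneg k) hkn⟩
    by_cases hd : gInt ∣ (k : Int)
    · simp [PySem.Int.mod_eq_zero_iff_dvd, hd, hiff]
    · simp [PySem.Int.mod_eq_zero_iff_dvd, hd, hiff]

-- ===== VERDICT (by name: the statement is the Claim_ definition above) =====
theorem kleene_star_py_spec : Claim_equal_kleene_star_py := by
  intro fl n _ hpre
  unfold Pre_kleene_star_py at hpre
  unfold Spec_kleene_star_py
  exact main_eq fl n hpre
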